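-- pv_equiv track=rewrite | github.com/yyht/openrlhf_async_pipline | openrlhf/openrlhf/trainer/ppo_utils/exp_balancing.py | balanced_subset
-- ===== SOURCE A (Python) =====
-- def balanced_subset(lst, k):
--     n = len(lst)
--     if k > n:
--         k = n  # 如果k大于列表长度，则取整个列表
--     if k == 0:
--         return [], []  # 返回空列表和原列表
--
--     # 统计0和1的数量
--     count0 = lst.count(0)
--     count1 = n - count0
--
--     # 计算0的最小和最大可能数量
--     low_bound = max(0, k - count1)  # 至少需要这么多0
--     high_bound = min(count0, k)     # 至多能取这么多0
--
--     # 候选0的数量：k//2, (k+1)//2, 以及边界值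
--     candidates = {k // 2, (k + 1) // 2, low_bound, high_bound}
--     # 过滤出在可行范围内的候选值
--     valid_candidates = [x for x in candidates if low_bound <= x <= high_bound]
--
--     # 选择最优的0的数量（使|2x - k|最小，相同最小值时选较大的x）
--     best_x = None
--     best_value = float('inf')
--     for x in valid_candidates:
--         value = abs(2 * x - k)  # 衡量均衡度的目标函数
--         if value < best_value:
--             best_value = value
--             best_x = x
--         elif value == best_value:
--             if x > best_x:  # 相同均衡度时，选0的数量更多
--                 best_x = x
--
--     x0 = best_x
--     y0 = k - x0  # 1的数量
--
--     # 收集0和1的索引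
--     zeros_indices = []
--     ones_indices = []
--     for idx, num in enumerate(lst):
--         if num == 0:
--             zeros_indices.append(idx)
--         else:
--             ones_indices.append(idx)
--
--     if len(ones_indices) < 1:
--         return [], []
--
--     # 选取前x0个0和前y0个1的索引
--     selected_zeros = zeros_indices[:x0]
--     selected_ones = ones_indices[:y0]
--
--     # 合并索引并排序以保持原顺序
--     selected_indices = sorted(selected_zeros + selected_ones)
--
--     # 计算剩余元素
--     remaining_indices = [i for i in range(n) if i not in selected_indices]
--
--     return selected_indices, remaining_indices
-- ===== SOURCE B (Python) =====
-- def balanced_subset(lst, k):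
--     n = len(lst)
--     if k > n:
--         k = n
--     if k == 0:
--         return [], []
--     count0 = sum(1 for v in lst if v == 0)
--     count1 = n - count0
--     if count1 == 0:
--         return [], []
--     low_bound = max(0, k - count1)
--     high_bound = min(count0, k)
--     # closed form: |2x-k| is minimised (ties -> larger x) at (k+1)//2, clamped to [low, high]
--     x0 = max(low_bound, min(high_bound, (k + 1) // 2))
--     y0 = k - x0
--     zeros = [i for i, v in enumerate(lst) if v == 0]
--     ones = [i for i, v in enumerate(lst) if v != 0]
--     selected = sorted(zeros[:x0] + ones[:y0])
--     remaining = sorted(zeros[x0:] + ones[y0:])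
--     return selected, remaining
-- ===== Notes on version B (the rewrite author's own statement) =====
-- stated objective: faster
-- what changed: B replaces A's candidate-set construction plus argmin loop by the closed form x0 = max(low_bound, min(high_bound, (k+1)//2)) and builds the remaining indices directly by sorting the leftover partition (zeros[x0:] + ones[y0:]) instead of rescanning range(n) with a quadratic list-membership test.
import Mathlib
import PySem

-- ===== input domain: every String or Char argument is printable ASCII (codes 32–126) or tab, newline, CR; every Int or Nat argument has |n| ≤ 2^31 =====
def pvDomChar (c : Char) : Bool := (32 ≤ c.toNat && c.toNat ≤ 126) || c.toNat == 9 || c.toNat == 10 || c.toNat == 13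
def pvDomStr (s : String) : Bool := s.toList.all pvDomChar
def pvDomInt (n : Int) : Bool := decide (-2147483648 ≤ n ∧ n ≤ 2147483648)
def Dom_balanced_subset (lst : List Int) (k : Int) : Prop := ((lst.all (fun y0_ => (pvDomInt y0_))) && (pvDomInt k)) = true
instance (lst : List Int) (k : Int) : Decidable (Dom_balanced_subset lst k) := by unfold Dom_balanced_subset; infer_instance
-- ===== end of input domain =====

-- B replaces A's candidate-set + argmin loop by the closed form max(low, min(high, (k+1)//2)) and
-- builds `remaining` by sorting the leftover partition instead of rescanning range(n) with a
-- list-membership test (objective: faster, measured; return value is what is proved equal,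
-- neither version mutates its arguments).

-- ===== PORT A =====
-- abs(2*x - k), the balance objective of A's argmin loop
def aAbs (k x : Int) : Int := |2 * x - k|

-- one iteration of A's `for x in valid_candidates` argmin loop; state = (best_x, best_value),
-- `none` = the initial (None, inf) state
def aBestStep (k : Int) (acc : Option (Int × Int)) (x : Int) : Option (Int × Int) :=
  let v := aAbs k x
  match acc with
  | none => some (x, v)
  | some (bx, bv) =>
    if v < bv then some (x, v)
    else if v = bv then (if bx < x then some (x, bv) else some (bx, bv))
    else some (bx, bv)

-- one iteration of A's `for idx, num in enumerate(lst)` loop collecting zeros/ones indices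
def aPartStep (acc : List Int × List Int) (p : Int × Int) : List Int × List Int :=
  if p.2 == 0 then (acc.1 ++ [p.1], acc.2) else (acc.1, acc.2 ++ [p.1])

def balanced_subset (lst : List Int) (k : Int) : List Int × List Int :=
  let n : Int := lst.length
  let k1 : Int := if k > n then n else k
  if k1 = 0 then ([], [])
  else
    let count0 : Int := (PySem.List.count lst 0 : Int)
    let count1 : Int := n - count0
    let low : Int := max 0 (k1 - count1)
    let high : Int := min count0 k1
    let candidates : PySem.Set Int :=
      PySem.Set.ofList [PySem.Int.floordiv k1 2, PySem.Int.floordiv (k1 + 1) 2, low, high]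
    let valid : List Int := candidates.filter (fun x => decide (low ≤ x ∧ x ≤ high))
    match valid.foldl (aBestStep k1) none with
    | none => ([], [])   -- best_x is still None: Python raises TypeError at `k - best_x` (k < 0, outside Pre_)
    | some (bx, _) =>
      let x0 := bx
      let y0 := k1 - x0
      let zo := (PySem.List.enumerate lst 0).foldl aPartStep ([], [])
      let zeros := zo.1
      let ones := zo.2
      if (ones.length : Int) < 1 then ([], [])
      else
        let selected := PySem.List.sorted
          (PySem.List.slice zeros none (some x0) ++ PySem.List.slice ones none (some y0))
          (fun x => x) false
        let remaining := (PySem.List.pyRange 0 n 1).filter (fun i => decide (i ∉ selected))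
        (selected, remaining)

-- ===== PORT B =====
def balanced_subset_alt (lst : List Int) (k : Int) : List Int × List Int :=
  let n : Int := lst.length
  let k1 : Int := min k n
  if k1 = 0 then ([], [])
  else
    let count0 : Int := (lst.countP (fun v => v == 0) : Int)
    let count1 : Int := n - count0
    if count1 = 0 then ([], [])
    else
      let low : Int := max 0 (k1 - count1)
      let high : Int := min count0 k1
      let x0 : Int := max low (min high (PySem.Int.floordiv (k1 + 1) 2))
      let y0 : Int := k1 - x0
      let e := PySem.List.enumerate lst 0
      let zeros : List Int := (e.filter (fun p => p.2 == 0)).map (fun p => p.1)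
      let ones : List Int := (e.filter (fun p => p.2 != 0)).map (fun p => p.1)
      let selected := PySem.List.sorted
        (PySem.List.slice zeros none (some x0) ++ PySem.List.slice ones none (some y0))
        (fun x => x) false
      let remaining := PySem.List.sorted
        (PySem.List.slice zeros (some x0) none ++ PySem.List.slice ones (some y0) none)
        (fun x => x) false
      (selected, remaining)

-- ===== PRECONDITION & SPEC =====
-- Pre_ excludes k < 0: there A's candidate list is empty, best_x stays None and `k - best_x`
-- raises TypeError.
def Pre_balanced_subset (lst : List Int) (k : Int) : Prop := 0 ≤ k
instance (lst : List Int) (k : Int) : Decidable (Pre_balanced_subset lst k) := by unfold Pre_balanced_subset; infer_instance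
def pvWitness_balanced_subset : List Int × Int := ([0, 1, 1, 0, 7], 3)

def Spec_balanced_subset (lst : List Int) (k : Int) (out : List Int × List Int) : Prop := out = balanced_subset_alt lst k
instance (lst : List Int) (k : Int) (out : List Int × List Int) : Decidable (Spec_balanced_subset lst k out) := by unfold Spec_balanced_subset; infer_instance

-- ===== CLAIM (what is proved, stated in full; the proofs are below) =====
def Claim_equal_balanced_subset : Prop := ∀ (lst : List Int) (k : Int), Dom_balanced_subset lst k → Pre_balanced_subset lst k → Spec_balanced_subset lst k (balanced_subset lst k)

-- ===== LEMMAS AND PROOFS =====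

theorem aAbs_eq (k x : Int) : aAbs k x = ((2 * x - k).natAbs : Int) := Int.abs_eq_natAbs _

-- proof-side closed form of one argmin step on an already-initialised state
def best2 (k a x : Int) : Int :=
  if aAbs k x < aAbs k a then x else if aAbs k x = aAbs k a ∧ a < x then x else a

-- "c is at least as good as y" in A's argmin order (smaller |2x-k|, ties to the larger x)
def beats (k c y : Int) : Prop := aAbs k c < aAbs k y ∨ (aAbs k c = aAbs k y ∧ y ≤ c)

theorem beats_refl (k c : Int) : beats k c c := Or.inr ⟨rfl, le_refl _⟩

theorem beats_trans {k a b c : Int} (h1 : beats k a b) (h2 : beats k b c) : beats k a c := by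
  simp only [beats, aAbs_eq] at *; omega

theorem beats_antisymm {k a b : Int} (h1 : beats k a b) (h2 : beats k b a) : a = b := by
  simp only [beats, aAbs_eq] at *; omega

theorem beats_best2_left (k a x : Int) : beats k (best2 k a x) a := by
  unfold best2 beats
  simp only [aAbs_eq] at *
  split_ifs with h1 h2 <;> push_cast at * <;> omega

theorem beats_best2_right (k a x : Int) : beats k (best2 k a x) x := by
  unfold best2 beats
  simp only [aAbs_eq] at *
  split_ifs with h1 h2 <;> push_cast at * <;> omega

theorem best2_mem (k a x : Int) : best2 k a x = a ∨ best2 k a x = x := by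
  unfold best2; split_ifs <;> simp

theorem aBestStep_some (k a x : Int) :
    aBestStep k (some (a, aAbs k a)) x = some (best2 k a x, aAbs k (best2 k a x)) := by
  simp only [aBestStep, best2]
  split_ifs with h1 h2 h3 <;> simp_all

theorem fold_aBestStep (k : Int) (l : List Int) : ∀ a : Int,
    l.foldl (aBestStep k) (some (a, aAbs k a)) =
      some (l.foldl (best2 k) a, aAbs k (l.foldl (best2 k) a)) := by
  induction l with
  | nil => intro a; rfl
  | cons x t ih => intro a; simp only [List.foldl_cons, aBestStep_some, ih]

theorem fold_best2_mem (k : Int) (l : List Int) : ∀ a : Int,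
    l.foldl (best2 k) a = a ∨ l.foldl (best2 k) a ∈ l := by
  induction l with
  | nil => intro a; exact Or.inl rfl
  | cons x t ih =>
    intro a
    simp only [List.foldl_cons]
    rcases ih (best2 k a x) with h | h
    · rw [h]
      rcases best2_mem k a x with h2 | h2
      · exact Or.inl h2
      · exact Or.inr (by rw [h2]; exact List.mem_cons_self)
    · exact Or.inr (List.mem_cons_of_mem x h)

theorem fold_best2_ub (k : Int) (l : List Int) : ∀ a y : Int,
    (y = a ∨ y ∈ l) → beats k (l.foldl (best2 k) a) y := by
  induction l with
  | nil =>
    rintro a y (rfl | h)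
    · exact beats_refl k y
    · simp at h
  | cons x t ih =>
    rintro a y (rfl | hy)
    · exact beats_trans (ih (best2 k y x) _ (Or.inl rfl)) (beats_best2_left k y x)
    · rcases List.mem_cons.mp hy with rfl | hy
      · exact beats_trans (ih (best2 k a y) _ (Or.inl rfl)) (beats_best2_right k a y)
      · exact ih (best2 k a x) y (Or.inr hy)

-- A's zeros/ones collection loop is the pair of filtered index lists
theorem fold_aPartStep (l : List (Int × Int)) : ∀ acc : List Int × List Int,
    l.foldl aPartStep acc =
      (acc.1 ++ (l.filter (fun p => p.2 == 0)).map (fun p => p.1),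
       acc.2 ++ (l.filter (fun p => p.2 != 0)).map (fun p => p.1)) := by
  induction l with
  | nil => intro acc; simp
  | cons p t ih =>
    intro acc
    by_cases h : p.2 = 0 <;>
      simp [aPartStep, List.foldl_cons, ih, h, List.append_assoc]

theorem length_filtered_enum (lst : List Int) (q : Int → Bool) :
    (((PySem.List.enumerate lst 0).filter (fun p => q p.2)).map (fun p => p.1)).length
      = lst.countP q := by
  rw [List.length_map, ← List.countP_eq_length_filter]
  have : (fun p : Int × Int => q p.2) = (fun v => q v) ∘ (fun p : Int × Int => p.2) := rfl
  rw [this, ← List.countP_map, PySem.List.map_snd_enumerate]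

theorem countP_not_eq (lst : List Int) :
    lst.countP (fun v => v != 0) = lst.length - lst.countP (fun v => v == 0) := by
  have h := List.length_eq_countP_add_countP (p := fun v : Int => v == 0) (l := lst)
  have e : lst.countP (fun v : Int => v != 0)
      = lst.countP (fun a : Int => decide ¬(a == 0) = true) := by
    apply List.countP_congr; intro v _; simp [bne]
  rw [e]
  omega

-- the zeros/ones index lists, as B computes them
def zerosOf (lst : List Int) : List Int :=
  ((PySem.List.enumerate lst 0).filter (fun p => p.2 == 0)).map (fun p => p.1)
def onesOf (lst : List Int) : List Int :=
  ((PySem.List.enumerate lst 0).filter (fun p => p.2 != 0)).map (fun p => p.1)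

theorem zeros_append_ones_perm (lst : List Int) :
    (zerosOf lst ++ onesOf lst).Perm (PySem.List.pyRange 0 (lst.length : Int) 1) := by
  unfold zerosOf onesOf
  have e : (PySem.List.enumerate lst 0).filter (fun p => p.2 != 0)
      = (PySem.List.enumerate lst 0).filter (fun p => !(p.2 == 0)) := by
    apply List.filter_congr; intro p _; simp [bne]
  rw [e, ← List.map_append]
  have h := List.filter_append_perm (fun p : Int × Int => p.2 == 0) (PySem.List.enumerate lst 0)
  have h2 := h.map (fun p : Int × Int => p.1)
  have h3 := PySem.List.map_fst_enumerate lst 0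
  rw [h3] at h2
  simpa using h2

theorem remaining_eq (lst : List Int) (x0 y0 : Int) :
    (PySem.List.pyRange 0 (lst.length : Int) 1).filter
        (fun i => decide (i ∉ PySem.List.sorted
          ((zerosOf lst).take x0.toNat ++ (onesOf lst).take y0.toNat) (fun x => x) false))
      = PySem.List.sorted
          ((zerosOf lst).drop x0.toNat ++ (onesOf lst).drop y0.toNat) (fun x => x) false := by
  set a := x0.toNat
  set b := y0.toNat
  set zs := zerosOf lst
  set os := onesOf lst
  have hperm := zeros_append_ones_perm lst
  have hnd : (zs ++ os).Nodup := hperm.nodup_iff.mpr (PySem.List.nodup_pyRange_one 0 _)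
  rw [List.nodup_append] at hnd
  obtain ⟨hndz, hndo, hdisj⟩ := hnd
  have hndzt : ∀ x ∈ zs.take a, ∀ y ∈ zs.drop a, x ≠ y := by
    have := hndz
    rw [← List.take_append_drop a zs, List.nodup_append] at this
    exact this.2.2
  have hndot : ∀ x ∈ os.take b, ∀ y ∈ os.drop b, x ≠ y := by
    have := hndo
    rw [← List.take_append_drop b os, List.nodup_append] at this
    exact this.2.2
  have hR : (zs.drop a ++ os.drop b).Nodup := by
    rw [List.nodup_append] at *
    exact ⟨hndz.sublist (List.drop_sublist a zs), hndo.sublist (List.drop_sublist b os),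
      fun x hx y hy => hdisj x (List.mem_of_mem_drop hx) y (List.mem_of_mem_drop hy)⟩
  have hL : ((PySem.List.pyRange 0 (lst.length : Int) 1).filter
      (fun i => decide (i ∉ PySem.List.sorted (zs.take a ++ os.take b) (fun x => x) false))).Nodup :=
    (PySem.List.nodup_pyRange_one 0 _).filter _
  have hmemsel : ∀ i : Int,
      i ∈ PySem.List.sorted (zs.take a ++ os.take b) (fun x => x) false ↔
        i ∈ zs.take a ∨ i ∈ os.take b := by
    intro i; rw [PySem.List.mem_sorted, List.mem_append]
  have hiff : ∀ i : Int,
      (i ∈ (PySem.List.pyRange 0 (lst.length : Int) 1).filter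
        (fun j => decide (j ∉ PySem.List.sorted (zs.take a ++ os.take b) (fun x => x) false))) ↔
      i ∈ zs.drop a ++ os.drop b := by
    intro i
    rw [List.mem_filter, decide_eq_true_eq, hmemsel, List.mem_append]
    constructor
    · rintro ⟨hir, hnsel⟩
      have : i ∈ zs ++ os := hperm.mem_iff.mpr hir
      rw [List.mem_append] at this
      rcases this with hz | ho
      · left
        rcases (by rw [List.take_append_drop] : i ∈ zs.take a ++ zs.drop a ↔ i ∈ zs).mpr hz
            |> List.mem_append.mp with h | h
        · exact absurd (Or.inl h) hnsel
        · exact h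
      · right
        rcases (by rw [List.take_append_drop] : i ∈ os.take b ++ os.drop b ↔ i ∈ os).mpr ho
            |> List.mem_append.mp with h | h
        · exact absurd (Or.inr h) hnsel
        · exact h
    · rintro (h | h)
      · have hz : i ∈ zs := List.mem_of_mem_drop h
        refine ⟨hperm.mem_iff.mp (List.mem_append.mpr (Or.inl hz)), ?_⟩
        rintro (ht | ht)
        · exact hndzt i ht i h rfl
        · exact hdisj i hz i (List.mem_of_mem_take ht) rfl
      · have ho : i ∈ os := List.mem_of_mem_drop h
        refine ⟨hperm.mem_iff.mp (List.mem_append.mpr (Or.inr ho)), ?_⟩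
        rintro (ht | ht)
        · exact hdisj i (List.mem_of_mem_take ht) i ho rfl
        · exact hndot i ht i h rfl
  have hLperm : ((PySem.List.pyRange 0 (lst.length : Int) 1).filter
      (fun i => decide (i ∉ PySem.List.sorted (zs.take a ++ os.take b) (fun x => x) false))).Perm
        (zs.drop a ++ os.drop b) :=
    (List.perm_ext_iff_of_nodup hL hR).mpr hiff
  exact PySem.List.sorted_eq_of_perm_of_pairwise_lt _ _ _ hLperm
    ((PySem.List.pairwise_lt_pyRange_one 0 _).filter _) |>.symm

-- ===== VERDICT (by name: the statement is the Claim_ definition above) =====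
theorem balanced_subset_spec : Claim_equal_balanced_subset := by
  intro lst k _ hk
  unfold Spec_balanced_subset balanced_subset balanced_subset_alt
  simp only []
  have hk1 : (if k > (lst.length : Int) then (lst.length : Int) else k) = min k lst.length := by
    split_ifs <;> omega
  rw [hk1]
  set K := min k (lst.length : Int) with hKdef
  by_cases hK0 : K = 0
  · simp [hK0]
  · simp only [if_neg hK0]
    replace hk : 0 ≤ k := hk
    have hcount : PySem.List.count lst 0 = lst.countP (fun v => v == 0) := by
      rw [PySem.List.count_eq]; rfl
    rw [hcount]
    set c0n := lst.countP (fun v => v == 0) with hc0def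
    have hc0le : c0n ≤ lst.length := List.countP_le_length
    have hKb : 1 ≤ K ∧ K ≤ (lst.length : Int) := by omega
    set low : Int := max 0 (K - ((lst.length : Int) - (c0n : Int))) with hlowdef
    set high : Int := min (c0n : Int) K with hhighdef
    set q1 : Int := PySem.Int.floordiv K 2 with hq1def
    set q2 : Int := PySem.Int.floordiv (K + 1) 2 with hq2def
    set c : Int := max low (min high q2) with hcdef
    have hq1 : q1 = K / 2 := PySem.Int.floordiv_eq_ediv_of_pos (by norm_num)
    have hq2 : q2 = (K + 1) / 2 := PySem.Int.floordiv_eq_ediv_of_pos (by norm_num)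
    have hlh : low ≤ high := by omega
    have hcr : low ≤ c ∧ c ≤ high := by omega
    have hc_mem_list : c ∈ ([q1, q2, low, high] : List Int) := by
      have hor : c = q2 ∨ c = low ∨ c = high := by omega
      rcases hor with h | h | h <;> simp [h]
    set valid : List Int := List.filter (fun x => decide (low ≤ x ∧ x ≤ high))
      (PySem.Set.ofList [q1, q2, low, high]) with hvdef
    have hcmem : c ∈ valid := by
      rw [hvdef]
      exact List.mem_filter.mpr ⟨(PySem.Set.mem_ofList _ _).mpr hc_mem_list, by
        rw [decide_eq_true_eq]; exact hcr⟩
    have hub : ∀ y ∈ valid, beats K c y := by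
      intro y hy
      obtain ⟨hmem, hpred⟩ := List.mem_filter.mp hy
      rw [PySem.Set.mem_ofList] at hmem
      rw [decide_eq_true_eq] at hpred
      simp only [List.mem_cons, List.not_mem_nil, or_false] at hmem
      unfold beats
      simp only [aAbs_eq]
      rcases hmem with rfl | rfl | rfl | rfl <;> omega
    obtain ⟨h0, t0, hvt⟩ := List.exists_cons_of_ne_nil (List.ne_nil_of_mem hcmem)
    have hfold : valid.foldl (aBestStep K) none
        = some (t0.foldl (best2 K) h0, aAbs K (t0.foldl (best2 K) h0)) := by
      rw [hvt]
      simp only [List.foldl_cons]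
      rw [show aBestStep K none h0 = some (h0, aAbs K h0) from rfl, fold_aBestStep]
    have hm_mem : t0.foldl (best2 K) h0 ∈ valid := by
      rw [hvt]
      rcases fold_best2_mem K t0 h0 with e | e
      · rw [e]; exact List.mem_cons_self
      · exact List.mem_cons_of_mem _ e
    have hmc : t0.foldl (best2 K) h0 = c := by
      refine beats_antisymm ?_ (hub _ hm_mem)
      refine fold_best2_ub K t0 h0 c ?_
      have := hcmem
      rw [hvt, List.mem_cons] at this
      exact this
    rw [hfold, hmc]
    simp only [fold_aPartStep, List.nil_append]
    rw [show ((PySem.List.enumerate lst 0).filter (fun p => p.2 == 0)).map (fun p => p.1)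
          = zerosOf lst from rfl,
       show ((PySem.List.enumerate lst 0).filter (fun p => p.2 != 0)).map (fun p => p.1)
          = onesOf lst from rfl]
    have hlones : (onesOf lst).length = lst.length - c0n := by
      unfold onesOf
      rw [length_filtered_enum lst (fun v => v != 0), countP_not_eq, hc0def]
    rw [hlones]
    by_cases hall : lst.length - c0n = 0
    · rw [if_pos (by omega : ((lst.length - c0n : Nat) : Int) < 1),
        if_pos (by omega : (lst.length : Int) - (c0n : Int) = 0)]
    · rw [if_neg (by omega : ¬ ((lst.length - c0n : Nat) : Int) < 1),
        if_neg (by omega : ¬ (lst.length : Int) - (c0n : Int) = 0)]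
      have hx0 : 0 ≤ c := by omega
      have hy0 : 0 ≤ K - c := by omega
      refine Prod.ext rfl ?_
      show List.filter _ _ = _
      rw [PySem.List.slice_to _ hx0, PySem.List.slice_to _ hy0,
        PySem.List.slice_from _ hx0, PySem.List.slice_from _ hy0]
      exact remaining_eq lst c (K - c)
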